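-- pv_equiv track=rewrite | github.com/AndresDvst/BotCryptoV2 | services/ai_analyzer_service.py | _format_ollama_host
-- ===== SOURCE A (Python) =====
-- def _format_ollama_host(host: str) -> str:
--     """Formatea y normaliza URL de Ollama."""
--     h = (host or "").strip()
--     if not h:
--         return ""
--     # Eliminar duplicaciones de protocolo
--     while any(h.startswith(dup) for dup in ["http://http://", "https://https://", "http://https://", "https://http://"]):
--         for dup in ["http://http://", "https://https://", "http://https://", "https://http://"]:
--             if h.startswith(dup):
--                 h = h.replace(dup, "http://" if dup.startswith("http://http://") else "https://", 1)
--                 break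
--     if not (h.startswith("http://") or h.startswith("https://")):
--         h = f"http://{h}"
--     return h.rstrip("/")
-- ===== SOURCE B (Python) =====
-- def _format_ollama_host(host: str) -> str:
--     """Formatea y normaliza URL de Ollama."""
--     h = (host or "").strip()
--     if not h:
--         return ""
--     # Peel every leading protocol token; remember if any was https.
--     any_https = False
--     while True:
--         if h.startswith("https://"):
--             any_https = True
--             h = h[8:]
--         elif h.startswith("http://"):
--             h = h[7:]
--         else:
--             break
--     return (("https://" if any_https else "http://") + h).rstrip("/")
-- ===== Notes on version B (the rewrite author's own statement) =====
-- stated objective: simpler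
-- what changed: Replaces A's pairwise while/for collapse of duplicated-protocol prefixes via str.replace with a single linear peel of leading protocol tokens (remembering whether any was https) followed by one reconstruction with the dominant protocol.
import Mathlib
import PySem

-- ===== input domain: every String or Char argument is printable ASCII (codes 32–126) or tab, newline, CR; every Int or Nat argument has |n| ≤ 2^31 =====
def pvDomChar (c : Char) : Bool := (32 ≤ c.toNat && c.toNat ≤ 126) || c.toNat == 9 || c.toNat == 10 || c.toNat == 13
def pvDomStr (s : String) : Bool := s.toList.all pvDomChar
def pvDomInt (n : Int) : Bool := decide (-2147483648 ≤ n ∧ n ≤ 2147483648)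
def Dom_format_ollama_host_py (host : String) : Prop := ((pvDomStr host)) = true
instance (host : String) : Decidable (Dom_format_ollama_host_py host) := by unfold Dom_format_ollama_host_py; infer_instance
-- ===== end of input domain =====

-- B replaces A's pairwise while/for duplicate-protocol collapse with one linear peel of
-- leading protocol tokens plus a single reconstruction (objective: simpler).


-- ===== PORT A =====
-- protocol tokens / duplicated prefixes, as explicit char lists
def pvHTTP : List Char := ['h','t','t','p',':','/','/']
def pvHTTPS : List Char := ['h','t','t','p','s',':','/','/']
def pvD1 : List Char := pvHTTP ++ pvHTTP      -- "http://http://"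
def pvD2 : List Char := pvHTTPS ++ pvHTTPS    -- "https://https://"
def pvD3 : List Char := pvHTTP ++ pvHTTPS     -- "http://https://"
def pvD4 : List Char := pvHTTPS ++ pvHTTP     -- "https://http://"

-- hand port of Python's s.replace(old, new, 1): replace the FIRST occurrence of old;
-- exact for nonempty old (PySem has no count-limited replace); A only calls it with nonempty old.
def pvReplaceOnce (s old new : List Char) : List Char :=
  let i := PySem.Chars.find s old
  if i = -1 then s else s.take i.toNat ++ new ++ s.drop (i.toNat + old.length)

-- s.rstrip("/"), hand port (exact: drop trailing '/' characters)
def pvRstripSlash (s : List Char) : List Char :=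
  (s.reverse.dropWhile (fun c => c == '/')).reverse

-- repl = "http://" if dup.startswith("http://http://") else "https://"
def pvARepl (dup : List Char) : List Char :=
  if PySem.Chars.startswith dup pvD1 then pvHTTP else pvHTTPS

-- lemmas the port needs for termination (cited in decreasing_by)
theorem pvFind_eq_zero_of_prefix (s old : List Char) (hp : old <+: s) :
    PySem.Chars.find s old = 0 := by
  have hnn : 0 ≤ PySem.Chars.find s old :=
    (PySem.Chars.find_nonneg_iff _ _).mpr hp.isInfix
  obtain ⟨-, hmin⟩ := PySem.Chars.find_spec (s := s) (sub := old) hnn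
  by_contra hne
  have h0 : 0 < (PySem.Chars.find s old).toNat := by omega
  exact hmin 0 h0 (by simpa using hp)

theorem pvReplaceOnce_of_prefix (s old new : List Char) (hp : old <+: s) :
    pvReplaceOnce s old new = new ++ s.drop old.length := by
  simp [pvReplaceOnce, pvFind_eq_zero_of_prefix s old hp]

theorem pvReplaceOnce_len_lt (s old new : List Char) (hp : old <+: s)
    (hlen : new.length < old.length) : (pvReplaceOnce s old new).length < s.length := by
  rw [pvReplaceOnce_of_prefix s old new hp]
  have := hp.length_le
  simp [List.length_append, List.length_drop]
  omega

-- the while/for collapse loop of A: while h starts with some dup, replace the first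
-- matching dup (in list order) by its repl, once
def pvALoop (h : List Char) : List Char :=
  if h1 : PySem.Chars.startswith h pvD1 then pvALoop (pvReplaceOnce h pvD1 (pvARepl pvD1))
  else if h2 : PySem.Chars.startswith h pvD2 then pvALoop (pvReplaceOnce h pvD2 (pvARepl pvD2))
  else if h3 : PySem.Chars.startswith h pvD3 then pvALoop (pvReplaceOnce h pvD3 (pvARepl pvD3))
  else if h4 : PySem.Chars.startswith h pvD4 then pvALoop (pvReplaceOnce h pvD4 (pvARepl pvD4))
  else h
termination_by h.length
decreasing_by
  · exact pvReplaceOnce_len_lt _ _ _ ((PySem.Chars.startswith_iff _ _).mp h1) (by decide)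
  · exact pvReplaceOnce_len_lt _ _ _ ((PySem.Chars.startswith_iff _ _).mp h2) (by decide)
  · exact pvReplaceOnce_len_lt _ _ _ ((PySem.Chars.startswith_iff _ _).mp h3) (by decide)
  · exact pvReplaceOnce_len_lt _ _ _ ((PySem.Chars.startswith_iff _ _).mp h4) (by decide)

-- (host or "").strip() = host.strip() for a str argument ("" strips to "")
def format_ollama_host_py (host : String) : String :=
  let h := (PySem.Str.strip host).toList
  if h = [] then ""
  else
    let h := pvALoop h
    let h := if PySem.Chars.startswith h pvHTTP || PySem.Chars.startswith h pvHTTPS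
             then h else pvHTTP ++ h
    String.ofList (pvRstripSlash h)

-- ===== PORT B =====
-- the peel loop of B: strip leading protocol tokens, remembering whether any was https
def pvBLoop (anyHttps : Bool) (h : List Char) : Bool × List Char :=
  if h1 : PySem.Chars.startswith h pvHTTPS then pvBLoop true (h.drop 8)
  else if h2 : PySem.Chars.startswith h pvHTTP then pvBLoop anyHttps (h.drop 7)
  else (anyHttps, h)
termination_by h.length
decreasing_by
  · have := ((PySem.Chars.startswith_iff _ _).mp h1).length_le
    simp [pvHTTPS] at this; simp [List.length_drop]; omega
  · have := ((PySem.Chars.startswith_iff _ _).mp h2).length_le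
    simp [pvHTTP] at this; simp [List.length_drop]; omega

def format_ollama_host_py_alt (host : String) : String :=
  let h := (PySem.Str.strip host).toList
  if h = [] then ""
  else
    let p := pvBLoop false h
    String.ofList (pvRstripSlash ((if p.1 then pvHTTPS else pvHTTP) ++ p.2))

-- ===== PRECONDITION & SPEC =====
def Spec_format_ollama_host_py (host : String) (out : String) : Prop := out = format_ollama_host_py_alt host
instance (host : String) (out : String) : Decidable (Spec_format_ollama_host_py host out) := by unfold Spec_format_ollama_host_py; infer_instance

-- ===== CLAIM (what is proved, stated in full; the proofs are below) =====
def Claim_equal_format_ollama_host_py : Prop := ∀ (host : String), Dom_format_ollama_host_py host → Spec_format_ollama_host_py host (format_ollama_host_py host)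


-- ===== LEMMAS AND PROOFS =====

-- A's post-loop result and B's reconstruction, as functions (proof-only abbreviations)
def pvA (h : List Char) : List Char :=
  if PySem.Chars.startswith (pvALoop h) pvHTTP || PySem.Chars.startswith (pvALoop h) pvHTTPS
  then pvALoop h else pvHTTP ++ pvALoop h

def pvB (h : List Char) : List Char :=
  (if (pvBLoop false h).1 then pvHTTPS else pvHTTP) ++ (pvBLoop false h).2

theorem pvSwTrue {h p : List Char} (hp : p <+: h) : PySem.Chars.startswith h p = true :=
  (PySem.Chars.startswith_iff _ _).mpr hp

theorem pvSwFalse {h p : List Char} (hp : ¬ p <+: h) : PySem.Chars.startswith h p = false :=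
  Bool.eq_false_iff.mpr (fun hsw => hp ((PySem.Chars.startswith_iff _ _).mp hsw))

-- the two tokens are incompatible prefixes
theorem pvNotHttpPrefix (t : List Char) : ¬ pvHTTP <+: pvHTTPS ++ t := by
  rintro ⟨s, hs⟩
  simp [pvHTTP, pvHTTPS] at hs

theorem pvNotHttpsPrefix (t : List Char) : ¬ pvHTTPS <+: pvHTTP ++ t := by
  rintro ⟨s, hs⟩
  simp [pvHTTP, pvHTTPS] at hs

theorem pvAReplD1 : pvARepl pvD1 = pvHTTP := by decide
theorem pvAReplD2 : pvARepl pvD2 = pvHTTPS := by decide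
theorem pvAReplD3 : pvARepl pvD3 = pvHTTPS := by decide
theorem pvAReplD4 : pvARepl pvD4 = pvHTTPS := by decide

theorem pvLenHttps (u : List Char) : (pvHTTPS ++ u).length = u.length + 8 := by
  simp [pvHTTPS]; try omega

theorem pvLenHttp (u : List Char) : (pvHTTP ++ u).length = u.length + 7 := by
  simp [pvHTTP]; try omega

theorem pvDropHttps (u : List Char) : (pvHTTPS ++ u).drop 8 = u := by simp [pvHTTPS]

theorem pvDropHttp (u : List Char) : (pvHTTP ++ u).drop 7 = u := by simp [pvHTTP]

-- pvBLoop unfolding equations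
theorem pvBLoopHttps (f : Bool) (t : List Char) :
    pvBLoop f (pvHTTPS ++ t) = pvBLoop true t := by
  rw [pvBLoop]
  simp [pvSwTrue ⟨t, rfl⟩, pvDropHttps]

theorem pvBLoopHttp (f : Bool) (t : List Char) :
    pvBLoop f (pvHTTP ++ t) = pvBLoop f t := by
  rw [pvBLoop]
  simp [pvSwFalse (pvNotHttpsPrefix t), pvSwTrue ⟨t, rfl⟩, pvDropHttp]

theorem pvBLoopNone (f : Bool) (t : List Char) (h1 : ¬ pvHTTPS <+: t) (h2 : ¬ pvHTTP <+: t) :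
    pvBLoop f t = (f, t) := by
  rw [pvBLoop]
  simp [pvSwFalse h1, pvSwFalse h2]

-- dup-prefix startswith facts used to steer pvALoop
theorem pvNoD1Https (t : List Char) : PySem.Chars.startswith (pvHTTPS ++ t) pvD1 = false :=
  pvSwFalse (fun hp => pvNotHttpPrefix t (List.IsPrefix.trans ⟨pvHTTP, rfl⟩ hp))

theorem pvNoD3Https (t : List Char) : PySem.Chars.startswith (pvHTTPS ++ t) pvD3 = false :=
  pvSwFalse (fun hp => pvNotHttpPrefix t (List.IsPrefix.trans ⟨pvHTTPS, rfl⟩ hp))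

theorem pvNoD2Http (t : List Char) : PySem.Chars.startswith (pvHTTP ++ t) pvD2 = false :=
  pvSwFalse (fun hp => pvNotHttpsPrefix t (List.IsPrefix.trans ⟨pvHTTPS, rfl⟩ hp))

theorem pvNoD4Http (t : List Char) : PySem.Chars.startswith (pvHTTP ++ t) pvD4 = false :=
  pvSwFalse (fun hp => pvNotHttpsPrefix t (List.IsPrefix.trans ⟨pvHTTP, rfl⟩ hp))

-- prefix cancellation for the dup tests
theorem pvSwCancel (p t q : List Char) :
    PySem.Chars.startswith (p ++ t) (p ++ q) = PySem.Chars.startswith t q := by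
  by_cases hq : q <+: t
  · rw [pvSwTrue ((List.prefix_append_right_inj p).mpr hq), pvSwTrue hq]
  · rw [pvSwFalse (fun hp => hq ((List.prefix_append_right_inj p).mp hp)),
        pvSwFalse hq]

-- one collapse step of pvALoop, for each of the four leading-token shapes
theorem pvAStepD2 (u : List Char) :
    pvALoop (pvHTTPS ++ (pvHTTPS ++ u)) = pvALoop (pvHTTPS ++ u) := by
  rw [pvALoop]
  have hpre : pvD2 <+: pvHTTPS ++ (pvHTTPS ++ u) := ⟨u, by simp [pvD2]⟩
  have hrep : pvReplaceOnce (pvHTTPS ++ (pvHTTPS ++ u)) pvD2 (pvARepl pvD2) = pvHTTPS ++ u := by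
    rw [pvReplaceOnce_of_prefix _ _ _ hpre, pvAReplD2]
    congr 1
  simp [pvNoD1Https, pvSwTrue hpre, hrep]

theorem pvAStepD4 (u : List Char) :
    pvALoop (pvHTTPS ++ (pvHTTP ++ u)) = pvALoop (pvHTTPS ++ u) := by
  rw [pvALoop]
  have hpre : pvD4 <+: pvHTTPS ++ (pvHTTP ++ u) := ⟨u, by simp [pvD4]⟩
  have hD2 : PySem.Chars.startswith (pvHTTPS ++ (pvHTTP ++ u)) pvD2 = false := by
    rw [pvD2, pvSwCancel]; exact pvSwFalse (pvNotHttpsPrefix u)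
  have hrep : pvReplaceOnce (pvHTTPS ++ (pvHTTP ++ u)) pvD4 (pvARepl pvD4) = pvHTTPS ++ u := by
    rw [pvReplaceOnce_of_prefix _ _ _ hpre, pvAReplD4]
    congr 1
  simp [pvNoD1Https, pvNoD3Https, hD2, pvSwTrue hpre, hrep]

theorem pvAStepD1 (u : List Char) :
    pvALoop (pvHTTP ++ (pvHTTP ++ u)) = pvALoop (pvHTTP ++ u) := by
  rw [pvALoop]
  have hpre : pvD1 <+: pvHTTP ++ (pvHTTP ++ u) := ⟨u, by simp [pvD1]⟩
  have hrep : pvReplaceOnce (pvHTTP ++ (pvHTTP ++ u)) pvD1 (pvARepl pvD1) = pvHTTP ++ u := by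
    rw [pvReplaceOnce_of_prefix _ _ _ hpre, pvAReplD1]
    congr 1
  simp [pvSwTrue hpre, hrep]

theorem pvAStepD3 (u : List Char) :
    pvALoop (pvHTTP ++ (pvHTTPS ++ u)) = pvALoop (pvHTTPS ++ u) := by
  rw [pvALoop]
  have hpre : pvD3 <+: pvHTTP ++ (pvHTTPS ++ u) := ⟨u, by simp [pvD3]⟩
  have hD1 : PySem.Chars.startswith (pvHTTP ++ (pvHTTPS ++ u)) pvD1 = false := by
    rw [pvD1, pvSwCancel]; exact pvSwFalse (pvNotHttpPrefix u)
  have hrep : pvReplaceOnce (pvHTTP ++ (pvHTTPS ++ u)) pvD3 (pvARepl pvD3) = pvHTTPS ++ u := by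
    rw [pvReplaceOnce_of_prefix _ _ _ hpre, pvAReplD3]
    congr 1
  simp [hD1, pvNoD2Http, pvSwTrue hpre, hrep]

-- pvALoop fixes a string with no duplicated-protocol prefix
theorem pvALoopFixHttps (t : List Char) (h1 : ¬ pvHTTPS <+: t) (h2 : ¬ pvHTTP <+: t) :
    pvALoop (pvHTTPS ++ t) = pvHTTPS ++ t := by
  rw [pvALoop]
  have hD2 : PySem.Chars.startswith (pvHTTPS ++ t) pvD2 = false := by
    rw [pvD2, pvSwCancel]; exact pvSwFalse h1
  have hD4 : PySem.Chars.startswith (pvHTTPS ++ t) pvD4 = false := by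
    rw [pvD4, pvSwCancel]; exact pvSwFalse h2
  simp [pvNoD1Https, pvNoD3Https, hD2, hD4]

theorem pvALoopFixHttp (t : List Char) (h1 : ¬ pvHTTPS <+: t) (h2 : ¬ pvHTTP <+: t) :
    pvALoop (pvHTTP ++ t) = pvHTTP ++ t := by
  rw [pvALoop]
  have hD1 : PySem.Chars.startswith (pvHTTP ++ t) pvD1 = false := by
    rw [pvD1, pvSwCancel]; exact pvSwFalse h2
  have hD3 : PySem.Chars.startswith (pvHTTP ++ t) pvD3 = false := by
    rw [pvD3, pvSwCancel]; exact pvSwFalse h1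
  simp [hD1, hD3, pvNoD2Http, pvNoD4Http]

theorem pvALoopFixNone (h : List Char) (h1 : ¬ pvHTTPS <+: h) (h2 : ¬ pvHTTP <+: h) :
    pvALoop h = h := by
  rw [pvALoop]
  have d1 : ¬ pvD1 <+: h := fun hp => h2 (List.IsPrefix.trans ⟨pvHTTP, rfl⟩ hp)
  have d2 : ¬ pvD2 <+: h := fun hp => h1 (List.IsPrefix.trans ⟨pvHTTPS, rfl⟩ hp)
  have d3 : ¬ pvD3 <+: h := fun hp => h2 (List.IsPrefix.trans ⟨pvHTTPS, rfl⟩ hp)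
  have d4 : ¬ pvD4 <+: h := fun hp => h1 (List.IsPrefix.trans ⟨pvHTTP, rfl⟩ hp)
  simp [pvSwFalse d1, pvSwFalse d2, pvSwFalse d3, pvSwFalse d4]

theorem pvMainAux : ∀ (n : Nat) (h : List Char), h.length ≤ n → pvA h = pvB h := by
  intro n
  induction n using Nat.strong_induction_on with
  | _ n ih =>
    intro h hlen
    by_cases hA : pvHTTPS <+: h
    · obtain ⟨t, rfl⟩ := hA
      have hL1 := pvLenHttps t
      by_cases hB : pvHTTPS <+: t
      · obtain ⟨u, rfl⟩ := hB
        have hL2 := pvLenHttps u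
        have key := ih ((pvHTTPS ++ u).length) (by omega) (pvHTTPS ++ u) le_rfl
        calc pvA (pvHTTPS ++ (pvHTTPS ++ u))
            = pvA (pvHTTPS ++ u) := by simp [pvA, pvAStepD2]
          _ = pvB (pvHTTPS ++ u) := key
          _ = pvB (pvHTTPS ++ (pvHTTPS ++ u)) := by simp [pvB, pvBLoopHttps]
      · by_cases hC : pvHTTP <+: t
        · obtain ⟨u, rfl⟩ := hC
          have hL2 := pvLenHttp u
          have hL3 := pvLenHttps u
          have key := ih ((pvHTTPS ++ u).length) (by omega) (pvHTTPS ++ u) le_rfl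
          calc pvA (pvHTTPS ++ (pvHTTP ++ u))
              = pvA (pvHTTPS ++ u) := by simp [pvA, pvAStepD4]
            _ = pvB (pvHTTPS ++ u) := key
            _ = pvB (pvHTTPS ++ (pvHTTP ++ u)) := by
                simp [pvB, pvBLoopHttps, pvBLoopHttp]
        · -- exactly one leading token, https
          have hfix := pvALoopFixHttps t hB hC
          have hbl : pvBLoop false (pvHTTPS ++ t) = (true, t) := by
            rw [pvBLoopHttps, pvBLoopNone _ _ hB hC]
          simp [pvA, pvB, hfix, hbl, pvSwTrue (⟨t, rfl⟩ : pvHTTPS <+: pvHTTPS ++ t)]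
    · by_cases hB : pvHTTP <+: h
      · obtain ⟨t, rfl⟩ := hB
        have hL1 := pvLenHttp t
        by_cases hC : pvHTTPS <+: t
        · obtain ⟨u, rfl⟩ := hC
          have hL2 := pvLenHttps u
          have key := ih ((pvHTTPS ++ u).length) (by omega) (pvHTTPS ++ u) le_rfl
          calc pvA (pvHTTP ++ (pvHTTPS ++ u))
              = pvA (pvHTTPS ++ u) := by simp [pvA, pvAStepD3]
            _ = pvB (pvHTTPS ++ u) := key
            _ = pvB (pvHTTP ++ (pvHTTPS ++ u)) := by simp [pvB, pvBLoopHttp]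
        · by_cases hD : pvHTTP <+: t
          · obtain ⟨u, rfl⟩ := hD
            have hL2 := pvLenHttp u
            have key := ih ((pvHTTP ++ u).length) (by omega) (pvHTTP ++ u) le_rfl
            calc pvA (pvHTTP ++ (pvHTTP ++ u))
                = pvA (pvHTTP ++ u) := by simp [pvA, pvAStepD1]
              _ = pvB (pvHTTP ++ u) := key
              _ = pvB (pvHTTP ++ (pvHTTP ++ u)) := by simp [pvB, pvBLoopHttp]
          · -- exactly one leading token, http
            have hfix := pvALoopFixHttp t hC hD
            have hbl : pvBLoop false (pvHTTP ++ t) = (false, t) := by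
              rw [pvBLoopHttp, pvBLoopNone _ _ hC hD]
            simp [pvA, pvB, hfix, hbl, pvSwTrue (⟨t, rfl⟩ : pvHTTP <+: pvHTTP ++ t)]
      · -- no leading protocol token
        have hfix := pvALoopFixNone h hA hB
        have hbl : pvBLoop false h = (false, h) := pvBLoopNone _ _ hA hB
        simp [pvA, pvB, hfix, hbl, pvSwFalse hA, pvSwFalse hB]

theorem pvMain (h : List Char) :
    (let a := pvALoop h;
     if PySem.Chars.startswith a pvHTTP || PySem.Chars.startswith a pvHTTPS
     then a else pvHTTP ++ a) =
    (if (pvBLoop false h).1 then pvHTTPS else pvHTTP) ++ (pvBLoop false h).2 :=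
  pvMainAux h.length h le_rfl

-- ===== VERDICT (by name: the statement is the Claim_ definition above) =====
theorem format_ollama_host_py_spec : Claim_equal_format_ollama_host_py := by
  intro host _
  unfold Spec_format_ollama_host_py format_ollama_host_py format_ollama_host_py_alt
  by_cases he : (PySem.Str.strip host).toList = []
  · simp [he]
  · simp only [he, ite_false]
    rw [pvMain]
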